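-- pv_equiv track=rewrite | github.com/atriadhiakri2000/Competitive-Programming | Codechef/Doctor Chef.py | solution
-- ===== SOURCE A (Python) =====
-- def solution(popu,x):
--     l=[]
--     c=0
--     for i in popu:
--         if(i<=x//2):
--             c=c+1
--         else:
--             l.append(i)
--     l.sort()
--     k=0
--     day=0
--     if(len(l)>0):
--         max_l=max(l)
--     while(k<len(l)):
--         tmp=l[k]
--         if(tmp<=x):
--             x=tmp*2
--             k=k+1
--         elif(x<=max_l):
--             x=x+x
--         day=day+1
--     return (day+c)
-- ===== SOURCE B (Python) =====
-- def solution(popu, x):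
--     half = x // 2
--     def go(c, ts):
--         if not ts:
--             return 0
--         t = ts[0]
--         skip = ((t - 1) // c).bit_length() if t > c else 0
--         return skip + 1 + go(2 * t, ts[1:])
--     return sum(1 for i in popu if i <= half) + go(x, sorted(i for i in popu if i > half))
-- ===== Notes on version B (the rewrite author's own statement) =====
-- stated objective: alternative
-- what changed: Replaces A's step-by-step doubling simulation (index-based while-loop state machine with separate counters) by a recursive decomposition over the sorted large elements that computes each batch of doubling days in closed form with integer bit_length arithmetic, never simulating a doubling.
import Mathlib
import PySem

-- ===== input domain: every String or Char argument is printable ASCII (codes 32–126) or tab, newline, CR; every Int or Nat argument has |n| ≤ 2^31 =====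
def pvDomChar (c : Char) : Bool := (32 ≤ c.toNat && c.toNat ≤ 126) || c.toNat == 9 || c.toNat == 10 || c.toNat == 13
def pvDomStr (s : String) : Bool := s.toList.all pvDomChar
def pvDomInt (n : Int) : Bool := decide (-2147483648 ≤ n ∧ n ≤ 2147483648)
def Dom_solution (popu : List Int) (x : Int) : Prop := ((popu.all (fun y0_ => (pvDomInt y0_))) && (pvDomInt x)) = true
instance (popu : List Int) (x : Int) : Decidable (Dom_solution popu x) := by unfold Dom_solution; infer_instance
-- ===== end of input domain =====

-- B replaces A's step-by-step doubling simulation (index-based while-loop state machine with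
-- separate counters) by a recursion over the sorted large elements that computes each batch of
-- doubling days in closed form via integer bit_length arithmetic (objective: alternative).

-- ===== PORT A =====
-- A's while-loop; the two 'day'-returning guards are totality guards only: on those states
-- Python A loops forever (a non-positive x never doubles upward; maxl < x is unreachable
-- when maxl is the maximum of l)
def solutionLoop (l : List Int) (maxl x : Int) (k : Nat) (day : Int) : Int :=
  if h : k < l.length then
    let tmp := l[k]
    if tmp ≤ x then solutionLoop l maxl (tmp * 2) (k + 1) (day + 1)
    else if x ≤ maxl then
      if 0 < x then solutionLoop l maxl (x + x) k (day + 1) else day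
    else day
  else day
termination_by (l.length - k, (2 * maxl - x).toNat)
decreasing_by
  · exact Prod.Lex.left _ _ (by omega)
  · exact Prod.Lex.right _ (by omega)

def solution (popu : List Int) (x : Int) : Int :=
  let cl := popu.foldl
    (fun (acc : Int × List Int) i =>
      if i ≤ PySem.Int.floordiv x 2 then (acc.1 + 1, acc.2) else (acc.1, acc.2 ++ [i]))
    (0, [])
  let l := PySem.List.sorted cl.2 (fun y => y) false
  -- max(l): Python computes max_l only when len(l) > 0; the default 0 is never read by the loop
  let maxl := (PySem.List.max? l (fun y => y)).getD 0
  solutionLoop l maxl x 0 0 + cl.1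

-- ===== PORT B =====
-- Source B's recursive go(c, ts): per element the batch of doubling days is the closed form
-- ((t-1)//c).bit_length() — PySem.Int.bitLength is Python's int.bit_length
def altGo (c : Int) (ts : List Int) : Int :=
  match ts with
  | [] => 0
  | t :: rest =>
      (if c < t then (PySem.Int.bitLength (PySem.Int.floordiv (t - 1) c) : Int) else 0)
        + 1 + altGo (2 * t) rest

def solution_alt (popu : List Int) (x : Int) : Int :=
  let half := PySem.Int.floordiv x 2
  ((popu.countP (fun i => decide (i ≤ half)) : Int))
    + altGo x (PySem.List.sorted (popu.filter (fun i => decide (half < i))) (fun y => y) false)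

-- ===== PRECONDITION & SPEC =====
-- Pre_ excludes exactly the inputs on which Python A never returns: when x ≤ 0 and some element
-- exceeds x // 2, A's while-loop diverges (doubling a non-positive x never grows it).
def Pre_solution (popu : List Int) (x : Int) : Prop :=
  0 < x ∨ ∀ i ∈ popu, i ≤ PySem.Int.floordiv x 2
instance (popu : List Int) (x : Int) : Decidable (Pre_solution popu x) := by
  unfold Pre_solution; infer_instance
def pvWitness_solution : List Int × Int := ([3, 1, 10], 2)
def Spec_solution (popu : List Int) (x : Int) (out : Int) : Prop := out = solution_alt popu x
instance (popu : List Int) (x : Int) (out : Int) : Decidable (Spec_solution popu x out) := by unfold Spec_solution; infer_instance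

-- ===== CLAIM (what is proved, stated in full; the proofs are below) =====
def Claim_equal_solution : Prop := ∀ (popu : List Int) (x : Int), Dom_solution popu x → Pre_solution popu x → Spec_solution popu x (solution popu x)

-- ===== LEMMAS AND PROOFS =====

-- proof-side model of one treated element of A's loop: the doubling sub-loop …
def altDouble (tmp x days : Int) : Int × Int :=
  if tmp ≤ x then (x, days)
  else if 0 < x then altDouble tmp (x * 2) (days + 1)
  else (x, days)
termination_by (tmp - x).toNat
decreasing_by omega

-- … and the whole per-element step (doubling days, then treat, capacity = tmp*2)
def altStep (s : Int × Int) (tmp : Int) : Int × Int :=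
  (tmp * 2, (altDouble tmp s.1 s.2).2)

-- A's loop run from index k is the altStep fold over the remaining suffix, counting one day
-- per remaining element plus the doublings
theorem solutionLoop_eq (l : List Int) (maxl x : Int) (k : Nat) (day : Int)
    (hmax : ∀ i ∈ l, i ≤ maxl) (hpos : ∀ i ∈ l, 0 < i) (hx : 0 < x) :
    solutionLoop l maxl x k day =
      ((l.drop k).foldl altStep (x, day + ((l.length - k : Nat) : Int))).2 := by
  revert hx
  fun_induction solutionLoop l maxl x k day with
  | case1 x k day h tmp hle ih =>
      intro hx
      rw [ih (by have := hpos _ (List.getElem_mem h); omega),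
        List.drop_eq_getElem_cons h, List.foldl_cons]
      have hs : altStep (x, day + ((l.length - k : Nat) : Int)) l[k]
          = (l[k] * 2, day + 1 + ((l.length - (k + 1) : Nat) : Int)) := by
        simp only [altStep]
        rw [altDouble, if_pos hle,
          show day + ((l.length - k : Nat) : Int)
            = day + 1 + ((l.length - (k + 1) : Nat) : Int) by omega]
      rw [hs]
  | case2 x k day h tmp hgt hle hx0 ih =>
      intro _
      rw [ih (by omega), List.drop_eq_getElem_cons h]
      simp only [List.foldl_cons]
      have hs : altStep (x, day + ((l.length - k : Nat) : Int)) l[k]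
          = altStep (x + x, day + 1 + ((l.length - k : Nat) : Int)) l[k] := by
        simp only [altStep]
        rw [altDouble, if_neg hgt, if_pos hx0, show x * 2 = x + x by ring,
          show day + ((l.length - k : Nat) : Int) + 1
            = day + 1 + ((l.length - k : Nat) : Int) by ring]
      rw [hs]
  | case3 x k day h tmp hgt hle hx0 =>
      intro hx; omega
  | case4 x k day h tmp hgt hgt2 =>
      intro hx
      exact absurd (hmax _ (List.getElem_mem h)) (by omega)
  | case5 x k day h =>
      intro hx
      rw [List.drop_eq_nil_of_le (by omega)]
      simp only [List.foldl_nil]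
      omega

-- the doubling sub-loop's day count is the closed form bit_length((t-1)//c)
theorem altDouble_closed (tmp x d : Int) (hx : 0 < x) :
    (altDouble tmp x d).2
      = d + (if x < tmp then (PySem.Int.bitLength (PySem.Int.floordiv (tmp - 1) x) : Int)
             else 0) := by
  revert hx
  fun_induction altDouble tmp x d with
  | case1 x d h =>
      intro hx
      simp [not_lt.mpr h]
  | case2 x d h hx0 ih =>
      intro _
      rw [ih (by omega)]
      have hxt : x < tmp := not_le.1 h
      have hq1 : (1 : Int) ≤ PySem.Int.floordiv (tmp - 1) x := by
        rw [PySem.Int.le_floordiv_iff_mul_le hx0]; omega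
      have hstep : PySem.Int.floordiv (PySem.Int.floordiv (tmp - 1) x) 2
          = PySem.Int.floordiv (tmp - 1) (x * 2) := by
        rw [PySem.Int.floordiv_eq_ediv_of_pos hx0,
          PySem.Int.floordiv_eq_ediv_of_pos (by norm_num : (0:Int) < 2),
          PySem.Int.floordiv_eq_ediv_of_pos (by omega : (0:Int) < x * 2),
          Int.ediv_ediv_of_nonneg (by omega)]
      have hBL : (PySem.Int.bitLength (PySem.Int.floordiv (tmp - 1) x) : Int)
          = (PySem.Int.bitLength (PySem.Int.floordiv (tmp - 1) (x * 2)) : Int) + 1 := by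
        rw [PySem.Int.bitLength_of_pos (by omega), hstep]
        push_cast; ring
      by_cases h2 : x * 2 < tmp
      · simp only [if_pos hxt, if_pos h2]
        rw [hBL]; ring
      · -- x < tmp ≤ 2x : the quotient is 1, one doubling
        have hq : PySem.Int.floordiv (tmp - 1) x = 1 := by
          rw [PySem.Int.floordiv_eq_iff_of_pos hx0]; omega
        have hb1 : PySem.Int.bitLength 1 = 1 := by decide
        simp only [if_pos hxt, if_neg h2, hq, hb1]
        push_cast; ring
  | case3 x d h hx0 =>
      intro hx; omega

-- the altStep fold is B's recursion altGo, up to the one-day-per-element offset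
theorem foldl_altStep_eq_altGo (ts : List Int) (c d : Int)
    (hc : 0 < c) (hpos : ∀ i ∈ ts, 0 < i) :
    (ts.foldl altStep (c, d)).2 = d + altGo c ts - (ts.length : Int) := by
  induction ts generalizing c d with
  | nil => simp [altGo]
  | cons t rest ih =>
      have ht : 0 < t := hpos t (by simp)
      simp only [List.foldl_cons, altStep]
      rw [ih (t * 2) _ (by omega) (fun i hi => hpos i (by simp [hi])),
        altDouble_closed t c d hc]
      simp only [altGo, show t * 2 = 2 * t by ring, List.length_cons]
      push_cast; ring

-- A's build loop is a count of the small elements and a filter of the large ones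
theorem build_split (popu : List Int) (half : Int) :
    popu.foldl
      (fun (acc : Int × List Int) i =>
        if i ≤ half then (acc.1 + 1, acc.2) else (acc.1, acc.2 ++ [i])) (0, [])
    = ((popu.countP (fun i => decide (i ≤ half)) : Int),
       popu.filter (fun i => decide (half < i))) := by
  have hf : (fun (acc : Int × List Int) i =>
        if i ≤ half then (acc.1 + 1, acc.2) else (acc.1, acc.2 ++ [i]))
      = (fun (acc : Int × List Int) i =>
        (if i ≤ half then acc.1 + 1 else acc.1,
         if half < i then acc.2 ++ [i] else acc.2)) := by
    funext acc i
    rcases le_or_gt i half with hc | hc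
    · simp [hc, not_lt.mpr hc]
    · simp [hc, not_le.mpr hc]
  rw [hf, PySem.List.foldl_prod_mk
    (f := fun (c : Int) i => if i ≤ half then c + 1 else c)
    (g := fun (acc : List Int) i => if half < i then acc ++ [i] else acc),
    PySem.List.foldl_ite_add_one, PySem.List.foldl_append_ite_eq_filter]
  simp

-- ===== VERDICT (by name: the statement is the Claim_ definition above) =====
theorem solution_spec : Claim_equal_solution := by
  intro popu x _ hpre
  unfold Pre_solution at hpre
  unfold Spec_solution
  simp only [solution, solution_alt, build_split]
  set half := PySem.Int.floordiv x 2 with hhalf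
  set F := popu.filter (fun i => decide (half < i)) with hF
  set l := PySem.List.sorted F (fun y => y) false with hl
  have hmemF : ∀ i ∈ l, half < i := by
    intro i hi
    have hiF : i ∈ F := (PySem.List.mem_sorted F (fun y => y) false i).1 hi
    exact of_decide_eq_true (List.mem_filter.1 hiF).2
  rcases hpre with hx | hall
  · -- x > 0 : run the loop lemma, then collapse the fold into altGo
    have hpos : ∀ i ∈ l, 0 < i := by
      intro i hi
      have hh : 0 ≤ half := by
        rw [hhalf, PySem.Int.floordiv_eq_ediv_of_pos (by norm_num)]; omega
      have := hmemF i hi; omega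
    have hmax : ∀ i ∈ l, i ≤ (PySem.List.max? l (fun y => y)).getD 0 := by
      intro i hi
      cases hM : PySem.List.max? l (fun y => y) with
      | none => exact absurd hi (by simp [(PySem.List.max?_eq_none_iff l (fun y => y)).1 hM])
      | some m =>
          simpa using PySem.List.max?_isMax hM i hi
    rw [solutionLoop_eq l _ x 0 0 hmax hpos hx]
    simp only [List.drop_zero, Nat.sub_zero, zero_add]
    rw [foldl_altStep_eq_altGo l x _ hx hpos]
    ring
  · -- x ≤ 0 (or anything) with every element small: l = []
    have hFnil : F = [] := by
      rw [hF, List.filter_eq_nil_iff]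
      intro i hi
      simp [not_lt.mpr (hall i hi)]
    have hlnil : l = [] := by
      rw [hl, hFnil]; rfl
    rw [hlnil, solutionLoop]
    simp [altGo]
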